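-- pv_equiv track=rewrite | github.com/suka1557/dsa_practice | leetcode5.py | check_pal_odd
-- ===== SOURCE A (Python) =====
-- def check_pal_odd(index: int, s: str) -> int:
--     n = len(s)
--     left, right = index - 1, index + 1
--     current_len = 1
--
--     while left > -1 and right < n:
--         if s[left] == s[right]:
--             current_len += 2
--         else:
--             break
--         left, right = left - 1, right + 1
--
--     return current_len
-- ===== SOURCE B (Python) =====
-- def check_pal_odd(index: int, s: str) -> int:
--     n = len(s)
--     if index < 0 or index >= n:
--         return 1
--     left = s[:index][::-1]
--     right = s[index + 1:]
--     match_len = 0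
--     for a, b in zip(left, right):
--         if a != b:
--             break
--         match_len += 1
--     return 1 + 2 * match_len
-- ===== Notes on version B (the rewrite author's own statement) =====
-- stated objective: alternative
-- what changed: Replaces the two-pointer in-place expansion with building the reversed left prefix and the right suffix and counting their common prefix length in one zip pass, returning 1 + 2*L.
import Mathlib
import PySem

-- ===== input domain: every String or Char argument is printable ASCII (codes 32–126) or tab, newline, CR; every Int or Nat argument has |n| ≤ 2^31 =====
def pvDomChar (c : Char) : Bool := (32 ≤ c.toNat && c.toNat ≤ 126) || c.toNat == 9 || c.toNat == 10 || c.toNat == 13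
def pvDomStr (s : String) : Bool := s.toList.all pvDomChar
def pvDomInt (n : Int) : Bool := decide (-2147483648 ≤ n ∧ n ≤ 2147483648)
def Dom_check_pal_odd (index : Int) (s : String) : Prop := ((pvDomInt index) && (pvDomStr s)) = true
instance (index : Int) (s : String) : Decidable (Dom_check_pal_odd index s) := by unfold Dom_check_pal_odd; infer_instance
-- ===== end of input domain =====

-- B replaces the two-pointer expansion with a common-prefix count of the reversed left
-- prefix against the right suffix (objective: alternative decomposition, same cost).

-- ===== PORT A =====
-- the while loop of A: state (left, right, current_len); s[left]/s[right] via pyGet?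
def pyA_loop (l : List Char) (left right cur : Int) : Int :=
  if h : left > -1 ∧ right < (l.length : Int) then
    match PySem.List.pyGet? l left, PySem.List.pyGet? l right with
    | some a, some b => if a = b then pyA_loop l (left - 1) (right + 1) (cur + 2) else cur
    | _, _ => cur
  else cur
termination_by ((l.length : Int) - right).toNat
decreasing_by omega

def check_pal_odd (index : Int) (s : String) : Int :=
  pyA_loop s.toList (index - 1) (index + 1) 1

-- ===== PORT B =====
-- the zip/break loop of Source B: length of the common prefix of two char lists
def lcpLen : List Char → List Char → Int
  | a :: as, b :: bs => if a = b then 1 + lcpLen as bs else 0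
  | _, _ => 0

-- s[:index][::-1] = (take index).reverse and s[index+1:] = drop (index+1);
-- exact since the guard ensures 0 ≤ index < len(s)
def check_pal_odd_alt (index : Int) (s : String) : Int :=
  let n : Int := s.toList.length
  if index < 0 ∨ n ≤ index then 1
  else 1 + 2 * lcpLen ((s.toList.take index.toNat).reverse) (s.toList.drop (index.toNat + 1))

-- ===== PRECONDITION & SPEC =====
def Spec_check_pal_odd (index : Int) (s : String) (out : Int) : Prop := out = check_pal_odd_alt index s
instance (index : Int) (s : String) (out : Int) : Decidable (Spec_check_pal_odd index s out) := by unfold Spec_check_pal_odd; infer_instance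

-- ===== CLAIM (what is proved, stated in full; the proofs are below) =====
def Claim_equal_check_pal_odd : Prop := ∀ (index : Int) (s : String), Dom_check_pal_odd index s → Spec_check_pal_odd index s (check_pal_odd index s)

-- ===== LEMMAS AND PROOFS =====

theorem lcpLen_nil_left (y : List Char) : lcpLen [] y = 0 := by cases y <;> rfl
theorem lcpLen_nil_right (x : List Char) : lcpLen x [] = 0 := by cases x <;> rfl
theorem lcpLen_cons (a b : Char) (as bs : List Char) :
    lcpLen (a :: as) (b :: bs) = if a = b then 1 + lcpLen as bs else 0 := rfl

-- loop invariant: A's expansion equals 2 × the common-prefix length of the remaining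
-- reversed left prefix and the remaining right suffix
theorem loop_eq (l : List Char) (d : Nat) : ∀ (r : Nat) (left cur : Int),
    l.length - r = d → left < (r : Int) →
    pyA_loop l left (r : Int) cur
      = cur + 2 * lcpLen ((l.take (left + 1).toNat).reverse) (l.drop r) := by
  induction d with
  | zero =>
    intro r left cur hd _
    have hr : l.length ≤ r := by omega
    unfold pyA_loop
    rw [dif_neg (by push_cast; omega)]
    simp [List.drop_eq_nil_of_le hr, lcpLen_nil_right]
  | succ d ih =>
    intro r left cur hd hlt
    have hr : r < l.length := by omega
    unfold pyA_loop
    by_cases hl : left > -1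
    · rw [dif_pos ⟨hl, by exact_mod_cast hr⟩]
      have hln : left.toNat < l.length := by omega
      have hgl : PySem.List.pyGet? l left = some l[left.toNat] := by
        rw [PySem.List.pyGet?_of_nonneg l (by omega : (0:Int) ≤ left)]
        simp [List.getElem?_eq_getElem hln]
      have hgr : PySem.List.pyGet? l (r : Int) = some l[r] := by
        rw [PySem.List.pyGet?_natCast]; simp [hr]
      rw [hgl, hgr]; dsimp only
      have htn : (left + 1).toNat = left.toNat + 1 := by omega
      have htake : (l.take (left + 1).toNat).reverse
          = l[left.toNat] :: (l.take left.toNat).reverse := by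
        rw [htn, List.take_succ]
        simp [List.getElem?_eq_getElem hln]
      have hdrop : l.drop r = l[r] :: l.drop (r + 1) := List.drop_eq_getElem_cons hr
      by_cases hc : l[left.toNat] = l[r]
      · rw [if_pos hc]
        have : (r : Int) + 1 = ((r + 1 : Nat) : Int) := by push_cast; ring
        rw [this, ih (r + 1) (left - 1) (cur + 2) (by omega) (by push_cast; omega)]
        have : (left - 1 + 1).toNat = left.toNat := by omega
        rw [this, htake, hdrop, hc, lcpLen_cons, if_pos rfl]
        ring
      · simp only [if_neg hc]
        rw [htake, hdrop, lcpLen_cons, if_neg hc]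
        ring
    · rw [dif_neg (by tauto)]
      have : (left + 1).toNat = 0 := by omega
      simp [this, lcpLen_nil_left]

-- ===== VERDICT (by name: the statement is the Claim_ definition above) =====
theorem check_pal_odd_spec : Claim_equal_check_pal_odd := by
  intro index s _
  unfold Spec_check_pal_odd check_pal_odd check_pal_odd_alt
  set l := s.toList with hl
  by_cases h : index < 0 ∨ (l.length : Int) ≤ index
  · rw [if_pos h]
    unfold pyA_loop
    rw [dif_neg (by omega)]
  · rw [if_neg h]
    push_neg at h
    obtain ⟨h0, h1⟩ := h
    have hri : index + 1 = ((index.toNat + 1 : Nat) : Int) := by omega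
    rw [hri, loop_eq l (l.length - (index.toNat + 1)) (index.toNat + 1) (index - 1) 1 rfl (by omega)]
    have : (index - 1 + 1).toNat = index.toNat := by omega
    rw [this]
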